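-- pv_equiv track=rewrite | github.com/jeanmiclo/adventofcode | 2025/07/solution.py | part1
-- ===== SOURCE A (Python) =====
-- from collections import defaultdict
--
-- def part1(data: list[str]) -> int:
--     grid = []
--     for line in data:
--         grid.append(line.rstrip())
--     start = (0, grid[0].index("S"))
--     n = len(grid)
--     dp = defaultdict(int)
--     dp[start] += 1
--     res = 0
--     for _ in range(n - 1):
--         ndp = defaultdict(int)
--         for (i, j), cur in dp.items():
--             if i == n - 1:
--                 continue
--             inc = 1
--             if grid[i + 1][j] == "^":
--                 res += 1
--                 ndp[(i + 1, j - 1)] += inc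
--                 ndp[(i + 1, j + 1)] += inc
--             else:
--                 ndp[(i + 1, j)] += inc
--         dp = ndp
--     return res
-- ===== SOURCE B (Python) =====
-- def part1(data: list[str]) -> int:
--     grid = [line.rstrip() for line in data]
--     n = len(grid)
--     stack = [(0, grid[0].index("S"))]
--     seen = set()
--     res = 0
--     while stack:
--         i, j = stack.pop()
--         if (i, j) in seen or i == n - 1:
--             continue
--         seen.add((i, j))
--         if grid[i + 1][j] == "^":
--             res += 1
--             stack.append((i + 1, j - 1))
--             stack.append((i + 1, j + 1))
--         else:
--             stack.append((i + 1, j))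
--     return res
-- ===== Notes on version B (the rewrite author's own statement) =====
-- stated objective: alternative
-- what changed: Replaces the row-synchronised BFS (a defaultdict of (row,col) cells rebuilt once per row for range(n-1) steps) with a stack-based flood fill over individual cells guarded by one global visited set; cells are popped in depth-first order instead of row by row.
import Mathlib
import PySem

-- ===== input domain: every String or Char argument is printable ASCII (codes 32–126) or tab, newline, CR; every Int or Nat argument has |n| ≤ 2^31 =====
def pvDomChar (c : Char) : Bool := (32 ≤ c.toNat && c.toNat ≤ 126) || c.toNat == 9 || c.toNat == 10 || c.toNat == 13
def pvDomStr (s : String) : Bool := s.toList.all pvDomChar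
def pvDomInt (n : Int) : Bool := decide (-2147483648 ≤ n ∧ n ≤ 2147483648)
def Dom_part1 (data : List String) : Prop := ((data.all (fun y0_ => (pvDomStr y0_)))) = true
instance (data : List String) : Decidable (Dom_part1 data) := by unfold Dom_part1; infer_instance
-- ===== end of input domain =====

-- B replaces A's row-synchronised defaultdict BFS (dp rebuilt once per row for range(n-1)
-- steps) by a stack-based flood fill over single cells with one global visited set
-- (objective: alternative; same asymptotic cost).

-- ===== PORT A =====
-- inner loop body: 'for (i, j), cur in dp.items(): …' (cur is read but unused: inc = 1);
-- grid[i + 1][j] wraps a negative j as Python does; the .getD defaults fire only where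
-- Python raises (excluded by Pre_part1)
def part1BodyA (grid : List String) (n : Int)
    (st2 : PySem.Dict (Int × Int) Int × Int) (kv : (Int × Int) × Int) :
    PySem.Dict (Int × Int) Int × Int :=
  if kv.1.1 == n - 1 then st2
  else
    let inc : Int := 1
    if (PySem.Str.pyGet? ((PySem.List.pyGet? grid (kv.1.1 + 1)).getD "") kv.1.2).getD ' ' == '^' then
      ((st2.1.modify (kv.1.1 + 1, kv.1.2 - 1) 0 (· + inc)).modify (kv.1.1 + 1, kv.1.2 + 1) 0 (· + inc),
       st2.2 + 1)
    else
      (st2.1.modify (kv.1.1 + 1, kv.1.2) 0 (· + inc), st2.2)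

def part1StepA (grid : List String) (n : Int)
    (st : PySem.Dict (Int × Int) Int × Int) (_ : Int) :
    PySem.Dict (Int × Int) Int × Int :=
  st.1.items.foldl (part1BodyA grid n) (PySem.Dict.empty, st.2)

def part1 (data : List String) : Int :=
  let grid : List String := data.foldl (fun acc line => acc ++ [PySem.Str.rstrip line]) []
  let start : Int × Int := (0, PySem.Str.find ((PySem.List.pyGet? grid 0).getD "") "S")
  let n : Int := PySem.List.len grid
  let dp : PySem.Dict (Int × Int) Int := PySem.Dict.empty.modify start 0 (· + 1)
  let fin := (PySem.List.pyRange 0 (n - 1) 1).foldl (part1StepA grid n) (dp, 0)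
  fin.2

-- ===== PORT B =====
-- 'while stack: i, j = stack.pop(); …' — the stack is the list's front (push = cons, pop =
-- head; the two appends j-1 then j+1 become cons j-1 then cons j+1, keeping LIFO order).
-- The Nat fuel is a totality guard only: under Pre_part1 the loop exits on the empty stack
-- first (lemma dfs_loop below); grid[i+1][j] is the same literal access as in A's port.
def part1LoopB (grid : List String) (n : Int) :
    Nat → List (Int × Int) → PySem.Set (Int × Int) → Int → Int
  | 0, _, _, res => res
  | _ + 1, [], _, res => res
  | fuel + 1, (i, j) :: stack, seen, res =>
      if seen.contains (i, j) || i == n - 1 then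
        part1LoopB grid n fuel stack seen res
      else
        let seen' := PySem.Set.add seen (i, j)
        if (PySem.Str.pyGet? ((PySem.List.pyGet? grid (i + 1)).getD "") j).getD ' ' == '^' then
          part1LoopB grid n fuel ((i + 1, j + 1) :: (i + 1, j - 1) :: stack) seen' (res + 1)
        else
          part1LoopB grid n fuel ((i + 1, j) :: stack) seen' res

def part1_alt (data : List String) : Int :=
  let grid : List String := data.map PySem.Str.rstrip
  let n : Int := PySem.List.len grid
  let j0 : Int := PySem.Str.find ((PySem.List.pyGet? grid 0).getD "") "S"
  part1LoopB grid n (2 + 2 * n.toNat * (2 * n.toNat + 1)) [(0, j0)] PySem.Set.empty 0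

-- ===== PRECONDITION & SPEC =====
-- Pre_part1 holds EXACTLY on the inputs where the Python A returns: data nonempty (else
-- grid[0] raises IndexError), 'S' in the first rstripped row (else .index raises ValueError),
-- and every access grid[i+1][j] made by the falling flow in Python index range -len ≤ j < len
-- (else IndexError); preFlow walks the rows once with the deduplicated set of active columns
-- to state the last condition.
def preStep (row : String) (cols : List Int) : Option (List Int) :=
  if cols.all (fun j => (PySem.Str.pyGet? row j).isSome) then
    some (PySem.Set.ofList (cols.flatMap
      (fun j => if (PySem.Str.pyGet? row j).getD ' ' == '^' then [j - 1, j + 1] else [j])))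
  else none

def preFlow : List String → List Int → Bool
  | [], _ => true
  | row :: rest, cols =>
      match preStep row cols with
      | none => false
      | some nxt => preFlow rest nxt

def Pre_part1 (data : List String) : Prop :=
  data ≠ [] ∧
  PySem.Str.isIn "S" (PySem.Str.rstrip (data.headD "")) = true ∧
  preFlow ((data.map PySem.Str.rstrip).drop 1)
    [PySem.Str.find (PySem.Str.rstrip (data.headD "")) "S"] = true

instance (data : List String) : Decidable (Pre_part1 data) := by
  unfold Pre_part1; infer_instance

def pvWitness_part1 : List String := [".S.", ".^."]

def Spec_part1 (data : List String) (out : Int) : Prop := out = part1_alt data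
instance (data : List String) (out : Int) : Decidable (Spec_part1 data out) := by
  unfold Spec_part1; infer_instance

-- ===== CLAIM (what is proved, stated in full; the proofs are below) =====
def Claim_equal_part1 : Prop :=
  ∀ (data : List String), Dom_part1 data → Pre_part1 data → Spec_part1 data (part1 data)

-- ===== LEMMAS AND PROOFS =====

-- the one-row character test both ports make: grid[r+1][j] == '^', and the cells reachable
-- from the stack's cells avoiding the seen-set `sn`, layered by rows (row n-1 blocked)
def caretg (grid : List String) (r : Nat) (j : Int) : Bool :=
  (PySem.Str.pyGet? ((PySem.List.pyGet? grid ((r : Int) + 1)).getD "") j).getD ' ' == '^'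

def ravg (grid : List String) (nn : Nat) (st sn : List (Int × Int)) : Nat → Int → Bool
  | 0, j => decide (0 + 1 < nn) && !(sn.contains ((0 : Int), j)) && st.contains ((0 : Int), j)
  | r + 1, j =>
      decide (r + 1 + 1 < nn) && !(sn.contains (((r : Int) + 1), j)) &&
      (st.contains (((r : Int) + 1), j) ||
        ((ravg grid nn st sn r j && !caretg grid r j) ||
         (ravg grid nn st sn r (j - 1) && caretg grid r (j - 1)) ||
         (ravg grid nn st sn r (j + 1) && caretg grid r (j + 1))))

lemma contains_add_of_not_mem (sn : List (Int × Int)) (u : Int × Int) (hs : u ∉ sn) :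
    ∀ c, (PySem.Set.add sn u).contains c = (sn.contains c || decide (c = u)) := by
  intro c
  rw [PySem.Set.add_of_not_mem hs]
  simp

-- popping an unseen cell u: u becomes blocked, its children become sources
set_option maxRecDepth 16384 in
lemma ravg_visit (grid : List String) (nn : Nat) (r0 : Nat) (jv : Int)
    (rest sn : List (Int × Int))
    (hs : ((r0 : Int), jv) ∉ sn) (hr : r0 + 2 ≤ nn) :
    ∀ r j, ravg grid nn (((r0 : Int), jv) :: rest) sn r j
      = ((ravg grid nn
            ((if caretg grid r0 jv then [((r0 : Int) + 1, jv + 1), ((r0 : Int) + 1, jv - 1)]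
              else [((r0 : Int) + 1, jv)]) ++ rest)
            (PySem.Set.add sn ((r0 : Int), jv)) r j)
         || (decide (r = r0) && decide (j = jv))) := by
  intro r
  induction r with
  | zero =>
    intro j
    by_cases h0 : r0 = 0
    · subst h0
      by_cases hj : j = jv
      · subst hj
        have hg : 0 + 1 < nn := by omega
        have hs0 : ((0 : Int), j) ∉ sn := by simpa using hs
        simp [ravg, List.contains_cons, hg, hs0]
      · simp only [ravg, List.contains_cons, contains_add_of_not_mem sn _ hs]
        cases hcar : caretg grid 0 jv <;>
          simp [beq_eq_decide, hj, hcar,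
            show ¬((0 : Int) = ((0 : Nat) : Int) + 1) from by omega]
    · simp only [ravg, List.contains_cons, contains_add_of_not_mem sn _ hs]
      cases hcar : caretg grid r0 jv <;>
        simp [beq_eq_decide, h0, show ¬((0 : Nat) = r0) from by omega,
          show ¬((0 : Int) = ((r0 : Nat) : Int)) from by omega,
          show ¬((0 : Int) = ((r0 : Nat) : Int) + 1) from by omega]
  | succ r ih =>
    intro j
    have e1 := ih j
    have e2 := ih (j - 1)
    have e3 := ih (j + 1)
    clear ih
    have hA : (((r : Int)) + 1 = ((r0 : Int))) = (r + 1 = r0) := propext ⟨by omega, by omega⟩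
    have hB : (((r : Int)) + 1 = ((r0 : Int)) + 1) = (r = r0) := propext ⟨by omega, by omega⟩
    have hq2 : (j - 1 = jv) = (j = jv + 1) := propext ⟨by omega, by omega⟩
    have hq3 : (j + 1 = jv) = (j = jv - 1) := propext ⟨by omega, by omega⟩
    have hv1 : (jv + 1 = jv - 1) = False := eq_false (by omega)
    have hv2 : (jv - 1 = jv + 1) = False := eq_false (by omega)
    have hv3 : (jv + 1 = jv) = False := eq_false (by omega)
    have hv4 : (jv - 1 = jv) = False := eq_false (by omega)
    have hv5 : (jv = jv + 1) = False := eq_false (by omega)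
    have hv6 : (jv = jv - 1) = False := eq_false (by omega)
    have hgN : r0 + 1 < nn := by omega
    have hsm : (((r0 : Int), jv) ∈ sn) = False := eq_false hs
    simp only [ravg]
    rw [e1, e2, e3]
    clear e1 e2 e3
    have wA1 : (((r0 : Int)) + 1 = ((r0 : Int))) = False := eq_false (by omega)
    have wA2 : (((r0 : Int)) = ((r0 : Int)) + 1) = False := eq_false (by omega)
    cases hcar : caretg grid r0 jv <;>
      simp only [hcar, Bool.false_eq_true, if_true, if_false, ite_true, ite_false,
        List.contains_cons, List.cons_append, List.nil_append,
        contains_add_of_not_mem sn _ hs, beq_eq_decide, Prod.mk.injEq, Nat.cast_inj,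
        Bool.decide_and, hq2, hq3] <;>
      by_cases hrr : r = r0 <;> by_cases hr1 : r + 1 = r0 <;>
      by_cases hj : j = jv <;> by_cases hj1 : j = jv + 1 <;> by_cases hj2 : j = jv - 1 <;>
        first
          | (exfalso; omega)
          | (simp [hA, hB, Nat.cast_inj, hq2, hq3, hv1, hv2, hv3, hv4, hv5, hv6, hgN, hsm,
               hcar, hs, wA1, wA2, hrr, hr1, hj, hj1, hj2]; done)
          | (simp [hA, hB, Nat.cast_inj, hq2, hq3, hv1, hv2, hv3, hv4, hv5, hv6, hgN, hsm,
               hcar, hs, wA1, wA2, hrr, hr1, hj, hj1, hj2,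
               show ((r : Int) + 1 = ((r0 : Int))) from by omega]; done)

lemma ravg_pop_blocked (grid : List String) (nn : Nat) (i jv : Int) (rest sn : List (Int × Int))
    (hb : (i, jv) ∈ sn ∨ i = (nn : Int) - 1) :
    ∀ r j, ravg grid nn ((i, jv) :: rest) sn r j = ravg grid nn rest sn r j := by
  intro r
  induction r with
  | zero =>
    intro j
    by_cases hc : ((0 : Int), j) = (i, jv)
    · injection hc with h1 h2
      subst h2
      subst h1
      rcases hb with hb | hb
      · simp [ravg, List.contains_cons, hb]
      · have hg : ¬ (0 + 1 < nn) := by omega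
        simp [ravg, hg]
    · simp only [ravg, List.contains_cons]
      simp [beq_eq_decide, hc]
  | succ r ih =>
    intro j
    by_cases hc : (((r : Int) + 1), j) = (i, jv)
    · injection hc with h1 h2
      subst h2
      rcases hb with hb | hb
      · rw [← h1] at hb
        simp [ravg, List.contains_cons, ← h1, hb, ih]
      · have hg : ¬ (r + 1 + 1 < nn) := by rw [← h1] at hb; omega
        simp [ravg, hg, ih]
    · simp only [ravg, List.contains_cons]
      simp [beq_eq_decide, hc, ih]

def phig (grid : List String) (nn : Nat) (J : Finset Int) (st sn : List (Int × Int)) : Int :=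
  ∑ p ∈ Finset.range nn ×ˢ J,
    (if ravg grid nn st sn p.1 p.2 && caretg grid p.1 p.2 then (1 : Int) else 0)

lemma ravg_nil (grid : List String) (nn : Nat) (sn : List (Int × Int)) :
    ∀ r j, ravg grid nn [] sn r j = false := by
  intro r
  induction r with
  | zero => intro j; simp [ravg]
  | succ r ih => intro j; simp [ravg, ih]

lemma phig_nil (grid : List String) (nn : Nat) (J : Finset Int) (sn : List (Int × Int)) :
    phig grid nn J [] sn = 0 := by
  unfold phig
  refine Finset.sum_eq_zero fun p _ => ?_
  simp [ravg_nil]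

lemma phig_pop_blocked (grid : List String) (nn : Nat) (J : Finset Int) (i jv : Int)
    (rest sn : List (Int × Int)) (hb : (i, jv) ∈ sn ∨ i = (nn : Int) - 1) :
    phig grid nn J ((i, jv) :: rest) sn = phig grid nn J rest sn := by
  unfold phig
  refine Finset.sum_congr rfl fun p _ => ?_
  rw [ravg_pop_blocked grid nn i jv rest sn hb]

lemma ravg_new_at_u (grid : List String) (nn : Nat) (r0 : Nat) (jv : Int)
    (ns sn : List (Int × Int)) (hs : ((r0 : Int), jv) ∉ sn) :
    ravg grid nn ns (PySem.Set.add sn ((r0 : Int), jv)) r0 jv = false := by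
  cases r0 with
  | zero =>
    simp [ravg, contains_add_of_not_mem sn _ hs]
  | succ r =>
    simp only [ravg, contains_add_of_not_mem sn _ hs]
    simp

lemma phig_visit (grid : List String) (nn : Nat) (J : Finset Int) (r0 : Nat) (jv : Int)
    (rest sn : List (Int × Int))
    (hs : ((r0 : Int), jv) ∉ sn) (hr : r0 + 2 ≤ nn) (hjJ : jv ∈ J) :
    phig grid nn J (((r0 : Int), jv) :: rest) sn
      = (if caretg grid r0 jv then (1 : Int) else 0)
        + phig grid nn J
            ((if caretg grid r0 jv then [((r0 : Int) + 1, jv + 1), ((r0 : Int) + 1, jv - 1)]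
              else [((r0 : Int) + 1, jv)]) ++ rest)
            (PySem.Set.add sn ((r0 : Int), jv)) := by
  unfold phig
  have key : ∀ p ∈ Finset.range nn ×ˢ J,
      (if ravg grid nn (((r0 : Int), jv) :: rest) sn p.1 p.2 && caretg grid p.1 p.2
        then (1 : Int) else 0)
      = (if ravg grid nn
            ((if caretg grid r0 jv then [((r0 : Int) + 1, jv + 1), ((r0 : Int) + 1, jv - 1)]
              else [((r0 : Int) + 1, jv)]) ++ rest)
            (PySem.Set.add sn ((r0 : Int), jv)) p.1 p.2 && caretg grid p.1 p.2
          then (1 : Int) else 0)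
        + (if p = (r0, jv) then (if caretg grid r0 jv then (1 : Int) else 0) else 0) := by
    intro p _
    rw [ravg_visit grid nn r0 jv rest sn hs hr p.1 p.2]
    by_cases hp0 : p = (r0, jv)
    · subst hp0
      rw [ravg_new_at_u grid nn r0 jv _ sn hs]
      simp
    · have hsplit : ¬(p.1 = r0 ∧ p.2 = jv) := by
        intro h
        exact hp0 (Prod.ext_iff.mpr h)
      simp [hp0, hsplit]
  rw [Finset.sum_congr rfl key, Finset.sum_add_distrib, Finset.sum_ite_eq']
  have hmem : (r0, jv) ∈ Finset.range nn ×ˢ J := by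
    rw [Finset.mem_product, Finset.mem_range]
    exact ⟨by omega, hjJ⟩
  rw [if_pos hmem]
  ring

lemma seen_len_le (nn : Nat) (j0 : Int) (seen : List (Int × Int)) (hnd : seen.Nodup)
    (hbd : ∀ c ∈ seen, ∃ r : Nat, c.1 = (r : Int) ∧ r + 2 ≤ nn ∧ (c.2 - j0).natAbs ≤ r) :
    seen.length ≤ nn * (2 * nn + 1) := by
  have hsub : seen.toFinset ⊆
      ((Finset.range nn).image (fun r : Nat => (r : Int))) ×ˢ
        Finset.Icc (j0 - (nn : Int)) (j0 + (nn : Int)) := by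
    intro c hc
    rw [List.mem_toFinset] at hc
    obtain ⟨r, hc1, hc2, hc3⟩ := hbd c hc
    rw [Finset.mem_product, Finset.mem_image]
    constructor
    · exact ⟨r, Finset.mem_range.mpr (by omega), hc1.symm⟩
    · rw [Finset.mem_Icc]
      omega
  have hcard := Finset.card_le_card hsub
  rw [List.toFinset_card_of_nodup hnd] at hcard
  have h1 : ((Finset.range nn).image (fun r : Nat => (r : Int))).card = nn := by
    rw [Finset.card_image_of_injective _ (fun a b h => by exact_mod_cast h), Finset.card_range]
  have h2 : (Finset.Icc (j0 - (nn : Int)) (j0 + (nn : Int))).card = 2 * nn + 1 := by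
    rw [Int.card_Icc]
    omega
  rw [Finset.card_product, h1, h2] at hcard
  exact hcard

lemma dfs_loop (grid : List String) (j0 : Int) (nn : Nat) (hn1 : 1 ≤ nn) :
    ∀ (fuel : Nat) (stack seen : List (Int × Int)) (res : Int),
      (∀ c ∈ stack, ∃ r : Nat, c.1 = (r : Int) ∧ r + 1 ≤ nn ∧ (c.2 - j0).natAbs ≤ r) →
      seen.Nodup →
      (∀ c ∈ seen, ∃ r : Nat, c.1 = (r : Int) ∧ r + 2 ≤ nn ∧ (c.2 - j0).natAbs ≤ r) →
      1 + stack.length + 2 * (nn * (2 * nn + 1)) ≤ fuel + 2 * seen.length →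
      part1LoopB grid (nn : Int) fuel stack seen res
        = res + phig grid nn (Finset.Icc (j0 - (nn : Int)) (j0 + (nn : Int))) stack seen := by
  intro fuel
  induction fuel with
  | zero =>
    intro stack seen res _ hnd hsbd hfuel
    have := seen_len_le nn j0 seen hnd hsbd
    omega
  | succ fuel ih =>
    intro stack seen res hstk hnd hsbd hfuel
    match stack with
    | [] =>
      rw [part1LoopB, phig_nil]
      ring
    | (i, j) :: rest =>
      obtain ⟨r0, hi, hr01, hjb⟩ := hstk (i, j) List.mem_cons_self
      simp only at hi hjb
      by_cases hblock : (PySem.Set.contains seen (i, j) || i == (nn : Int) - 1) = true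
      · rw [part1LoopB, if_pos hblock]
        have hb : (i, j) ∈ seen ∨ i = (nn : Int) - 1 := by
          rcases Bool.or_eq_true_iff.mp hblock with h | h
          · left; exact List.mem_of_elem_eq_true h
          · right; exact eq_of_beq h
        rw [ih rest seen res (fun c hc => hstk c (List.mem_cons_of_mem _ hc)) hnd hsbd
          (by simp at hfuel ⊢; omega)]
        rw [phig_pop_blocked grid nn _ i j rest seen hb]
      · have hof : (PySem.Set.contains seen (i, j) || i == (nn : Int) - 1) = false :=
          Bool.eq_false_iff.mpr hblock
        obtain ⟨hseen, hne⟩ := Bool.or_eq_false_iff.mp hof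
        subst hi
        have hne' : ((r0 : Int)) ≠ (nn : Int) - 1 := by simpa using hne
        have hr02 : r0 + 2 ≤ nn := by omega
        have hsnm : ((r0 : Int), j) ∉ seen := by simpa using hseen
        have hjJ : j ∈ Finset.Icc (j0 - (nn : Int)) (j0 + (nn : Int)) := by
          rw [Finset.mem_Icc]; omega
        have hlen : (PySem.Set.add seen ((r0 : Int), j)).length = seen.length + 1 := by
          rw [PySem.Set.add_of_not_mem hsnm, List.length_append]
          rfl
        have hnd' : (PySem.Set.add seen ((r0 : Int), j)).Nodup := PySem.Set.nodup_add seen ((r0 : Int), j) hnd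
        have hsbd' : ∀ c ∈ PySem.Set.add seen ((r0 : Int), j),
            ∃ r : Nat, c.1 = (r : Int) ∧ r + 2 ≤ nn ∧ (c.2 - j0).natAbs ≤ r := by
          intro c hc
          rcases (PySem.Set.mem_add seen _ c).mp hc with hc | hc
          · exact hsbd c hc
          · subst hc
            exact ⟨r0, rfl, hr02, hjb⟩
        rw [part1LoopB, if_neg hblock]
        show (if caretg grid r0 j = true then _ else _) = _
        cases hcar : caretg grid r0 j
        · rw [if_neg (by simp [hcar])]
          rw [ih _ _ res
            (by
              intro c hc
              rcases List.mem_cons.mp hc with hc | hc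
              · subst hc
                exact ⟨r0 + 1, by push_cast; ring, by omega, by simp only; omega⟩
              · exact hstk c (List.mem_cons_of_mem _ hc))
            hnd' hsbd'
            (by simp only [List.length_cons, hlen] at hfuel ⊢; omega)]
          rw [phig_visit grid nn _ r0 j rest seen hsnm hr02 hjJ, hcar]
          simp only [Bool.false_eq_true, if_false, List.cons_append, List.nil_append]
          ring
        · rw [if_pos (by simp [hcar])]
          rw [ih _ _ (res + 1)
            (by
              intro c hc
              rcases List.mem_cons.mp hc with hc | hc
              · subst hc
                exact ⟨r0 + 1, by push_cast; ring, by omega, by simp only; omega⟩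
              · rcases List.mem_cons.mp hc with hc | hc
                · subst hc
                  exact ⟨r0 + 1, by push_cast; ring, by omega, by simp only; omega⟩
                · exact hstk c (List.mem_cons_of_mem _ hc))
            hnd' hsbd'
            (by simp only [List.length_cons, hlen] at hfuel ⊢; omega)]
          rw [phig_visit grid nn _ r0 j rest seen hsnm hr02 hjJ, hcar]
          simp only [if_true, List.cons_append, List.nil_append]
          ring

def reachedb (grid : List String) (j0 : Int) : Nat → Int → Bool
  | 0, j => j == j0
  | t + 1, j =>
      (reachedb grid j0 t j && !caretg grid t j) ||
      (reachedb grid j0 t (j - 1) && caretg grid t (j - 1)) ||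
      (reachedb grid j0 t (j + 1) && caretg grid t (j + 1))

lemma ravg_init (grid : List String) (nn : Nat) (j0 : Int) :
    ∀ r j, ravg grid nn [((0 : Int), j0)] [] r j
      = (decide (r + 1 < nn) && reachedb grid j0 r j) := by
  intro r
  induction r with
  | zero =>
    intro j
    simp [ravg, reachedb, beq_eq_decide]
  | succ r ih =>
    intro j
    have hnz : ¬((r : Int) + 1 = 0) := by omega
    by_cases hg : r + 1 + 1 < nn
    · have hg' : r + 1 < nn := by omega
      simp [ravg, reachedb, ih, hg, hg', beq_eq_decide, hnz]
    · simp [ravg, hg]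

lemma phig_init (grid : List String) (nn : Nat) (J : Finset Int) (j0 : Int) :
    phig grid nn J [((0 : Int), j0)] []
      = ∑ r ∈ Finset.range (nn - 1), ∑ jj ∈ J,
          (if reachedb grid j0 r jj && caretg grid r jj then (1 : Int) else 0) := by
  unfold phig
  rw [Finset.sum_product]
  have hsub : Finset.range (nn - 1) ⊆ Finset.range nn := by
    intro x hx
    rw [Finset.mem_range] at *
    omega
  rw [← Finset.sum_subset hsub (by
    intro r hr hnr
    refine Finset.sum_eq_zero fun jj _ => ?_
    rw [ravg_init]
    have h1 := Finset.mem_range.mp hr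
    have h2 : ¬(r < nn - 1) := fun h => hnr (Finset.mem_range.mpr h)
    have : ¬(r + 1 < nn) := by omega
    simp [this])]
  refine Finset.sum_congr rfl fun r hr => Finset.sum_congr rfl fun jj _ => ?_
  rw [ravg_init]
  have h1 := Finset.mem_range.mp hr
  have : r + 1 < nn := by omega
  simp [this]

-- proof-side reference fold: A's BFS re-expressed as a fold over the rows carrying the set
-- of active columns (the bridge between the two ports)
def rowBody (below : String) (st2 : PySem.Set Int × Int) (j : Int) :
    PySem.Set Int × Int :=
  if (PySem.Str.pyGet? below j).getD ' ' == '^' then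
    (PySem.Set.add (PySem.Set.add st2.1 (j - 1)) (j + 1), st2.2 + 1)
  else
    (PySem.Set.add st2.1 j, st2.2)

def rowStep (st : PySem.Set Int × Int) (below : String) : PySem.Set Int × Int :=
  st.1.foldl (rowBody below) (PySem.Set.empty, st.2)

lemma fold_res (below : String) :
    ∀ (l : List Int) (acc : PySem.Set Int × Int),
      (l.foldl (rowBody below) acc).2
        = acc.2 + (l.countP (fun j => (PySem.Str.pyGet? below j).getD ' ' == '^') : Int) := by
  intro l
  induction l with
  | nil => intro acc; simp
  | cons x l ih =>
    intro acc
    rw [List.foldl_cons, ih, List.countP_cons]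
    unfold rowBody
    cases hc : (PySem.Str.pyGet? below x).getD ' ' == '^'
    · rw [if_neg (by simp [hc])]
      simp [hc]
    · rw [if_pos (by simp [hc])]
      simp
      ring

lemma fold_mem (below : String) :
    ∀ (l : List Int) (acc : PySem.Set Int × Int) (j' : Int),
      j' ∈ (l.foldl (rowBody below) acc).1
        ↔ (j' ∈ acc.1 ∨ ∃ jj ∈ l,
            (((PySem.Str.pyGet? below jj).getD ' ' == '^') = true ∧ (j' = jj - 1 ∨ j' = jj + 1))
          ∨ (((PySem.Str.pyGet? below jj).getD ' ' == '^') = false ∧ j' = jj)) := by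
  intro l
  induction l with
  | nil => intro acc j'; simp
  | cons x l ih =>
    intro acc j'
    rw [List.foldl_cons, ih]
    unfold rowBody
    by_cases hc : ((PySem.Str.pyGet? below x).getD ' ' == '^') = true
    · rw [if_pos hc]
      simp only [PySem.Set.mem_add, List.mem_cons]
      constructor
      · rintro (((h | h) | h) | ⟨jj, hjj, h⟩)
        · exact Or.inl h
        · exact Or.inr ⟨x, Or.inl rfl, Or.inl ⟨hc, Or.inl h⟩⟩
        · exact Or.inr ⟨x, Or.inl rfl, Or.inl ⟨hc, Or.inr h⟩⟩
        · exact Or.inr ⟨jj, Or.inr hjj, h⟩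
      · rintro (h | ⟨jj, (rfl | hjj), h⟩)
        · exact Or.inl (Or.inl (Or.inl h))
        · rcases h with ⟨_, (h | h)⟩ | ⟨hf, _⟩
          · exact Or.inl (Or.inl (Or.inr h))
          · exact Or.inl (Or.inr h)
          · rw [hc] at hf; cases hf
        · exact Or.inr ⟨jj, hjj, h⟩
    · rw [if_neg hc]
      rw [Bool.not_eq_true] at hc
      simp only [PySem.Set.mem_add, List.mem_cons]
      constructor
      · rintro ((h | h) | ⟨jj, hjj, h⟩)
        · exact Or.inl h
        · exact Or.inr ⟨x, Or.inl rfl, Or.inr ⟨hc, h⟩⟩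
        · exact Or.inr ⟨jj, Or.inr hjj, h⟩
      · rintro (h | ⟨jj, (rfl | hjj), h⟩)
        · exact Or.inl (Or.inl h)
        · rcases h with ⟨ht, _⟩ | ⟨_, h⟩
          · rw [hc] at ht; cases ht
          · exact Or.inl (Or.inr h)
        · exact Or.inr ⟨jj, hjj, h⟩

lemma fold_nodup (below : String) :
    ∀ (l : List Int) (acc : PySem.Set Int × Int), acc.1.Nodup →
      (l.foldl (rowBody below) acc).1.Nodup := by
  intro l
  induction l with
  | nil => intro acc h; simpa using h
  | cons x l ih =>
    intro acc h
    rw [List.foldl_cons]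
    refine ih _ ?_
    unfold rowBody
    by_cases hc : ((PySem.Str.pyGet? below x).getD ' ' == '^') = true
    · rw [if_pos hc]
      exact PySem.Set.nodup_add _ _ (PySem.Set.nodup_add _ _ h)
    · rw [if_neg hc]
      exact PySem.Set.nodup_add _ _ h

lemma row_phase (grid : List String) (j0 : Int) :
    ∀ (rows : List String) (t : Nat), grid.drop (t + 1) = rows →
      ∀ (cols : List Int) (res : Int),
        cols.Nodup →
        (∀ j, j ∈ cols ↔ reachedb grid j0 t j = true) →
        (∀ j ∈ cols, (j - j0).natAbs ≤ t) →
        (rows.foldl rowStep (cols, res)).2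
          = res + ∑ r ∈ Finset.Ico t (grid.length - 1),
              ∑ jj ∈ Finset.Icc (j0 - (grid.length : Int)) (j0 + (grid.length : Int)),
                (if reachedb grid j0 r jj && caretg grid r jj then (1 : Int) else 0) := by
  intro rows
  induction rows with
  | nil =>
    intro t hdrop cols res _ _ _
    have hlen : grid.length ≤ t + 1 := by
      by_contra h
      have : grid.drop (t + 1) ≠ [] := by
        apply List.ne_nil_of_length_pos
        rw [List.length_drop]
        omega
      exact this hdrop
    rw [Finset.Ico_eq_empty (by omega)]
    simp
  | cons below rows' ih =>
    intro t hdrop cols res hnd hmem hbd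
    have hlt : t + 1 < grid.length := by
      by_contra h
      rw [List.drop_eq_nil_of_le (by omega)] at hdrop
      exact (List.cons_ne_nil _ _) hdrop.symm
    have hbelow : (PySem.List.pyGet? grid ((t : Int) + 1)).getD "" = below := by
      have h1 : ((t : Int) + 1) = ((t + 1 : Nat) : Int) := by push_cast; ring
      rw [h1, PySem.List.pyGet?_natCast, ← List.head?_drop, hdrop]
      rfl
    have hcaret : ∀ j, ((PySem.Str.pyGet? below j).getD ' ' == '^') = caretg grid t j := by
      intro j
      rw [caretg, hbelow]
    have hdrop' : grid.drop (t + 1 + 1) = rows' := by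
      have h2 : grid.drop (t + 1 + 1) = (grid.drop (t + 1)).drop 1 := by
        rw [List.drop_drop]
      rw [h2, hdrop, List.drop_one, List.tail_cons]
    rw [List.foldl_cons]
    -- the one-row step
    have hstep2 : (rowStep (cols, res) below).2
        = res + (cols.countP (fun j => (PySem.Str.pyGet? below j).getD ' ' == '^') : Int) :=
      fold_res below cols (PySem.Set.empty, res)
    have hcount : (cols.countP (fun j => (PySem.Str.pyGet? below j).getD ' ' == '^') : Int)
        = ∑ jj ∈ Finset.Icc (j0 - (grid.length : Int)) (j0 + (grid.length : Int)),
            (if reachedb grid j0 t jj && caretg grid t jj then (1 : Int) else 0) := by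
      have hset : Finset.filter
            (fun jj => reachedb grid j0 t jj = true ∧ caretg grid t jj = true)
            (Finset.Icc (j0 - (grid.length : Int)) (j0 + (grid.length : Int)))
          = (cols.filter (fun j => (PySem.Str.pyGet? below j).getD ' ' == '^')).toFinset := by
        ext x
        rw [Finset.mem_filter, List.mem_toFinset, List.mem_filter, Finset.mem_Icc, hcaret x,
          ← hmem x]
        constructor
        · rintro ⟨_, h2, h3⟩
          exact ⟨h2, h3⟩
        · rintro ⟨h2, h3⟩
          have := hbd x h2
          refine ⟨⟨by omega, by omega⟩, h2, h3⟩
      have hnodup := hnd.filter (p := fun j => (PySem.Str.pyGet? below j).getD ' ' == '^')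
      calc (cols.countP (fun j => (PySem.Str.pyGet? below j).getD ' ' == '^') : Int)
          = ((cols.filter (fun j => (PySem.Str.pyGet? below j).getD ' ' == '^')).length : Int) := by
            rw [List.countP_eq_length_filter]
        _ = ((cols.filter (fun j => (PySem.Str.pyGet? below j).getD ' ' == '^')).toFinset.card : Int) := by
            rw [List.toFinset_card_of_nodup hnodup]
        _ = ∑ jj ∈ Finset.Icc (j0 - (grid.length : Int)) (j0 + (grid.length : Int)),
              (if reachedb grid j0 t jj = true ∧ caretg grid t jj = true then (1 : Int) else 0) := by
            rw [← hset, ← Finset.sum_boole]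
        _ = _ := by
            refine Finset.sum_congr rfl fun jj _ => ?_
            simp [Bool.and_eq_true]
    have hnd2 : (rowStep (cols, res) below).1.Nodup :=
      fold_nodup below cols (PySem.Set.empty, res) List.nodup_nil
    have hmemfold := fold_mem below cols (PySem.Set.empty, res)
    have hmem2 : ∀ j', j' ∈ (rowStep (cols, res) below).1
        ↔ reachedb grid j0 (t + 1) j' = true := by
      intro j'
      rw [rowStep, hmemfold j']
      simp only [hcaret, reachedb, Bool.or_eq_true, Bool.and_eq_true, Bool.not_eq_eq_eq_not,
        Bool.not_true]
      constructor
      · rintro (h | ⟨jj, hjj, ⟨hc, (rfl | rfl)⟩ | ⟨hc, rfl⟩⟩)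
        · cases h
        · right
          rw [show jj - 1 + 1 = jj by omega]
          exact ⟨(hmem jj).mp hjj, hc⟩
        · left; right
          rw [show jj + 1 - 1 = jj by omega]
          exact ⟨(hmem jj).mp hjj, hc⟩
        · left; left
          exact ⟨(hmem _).mp hjj, hc⟩
      · rintro ((⟨h1, h2⟩ | ⟨h1, h2⟩) | ⟨h1, h2⟩)
        · exact Or.inr ⟨j', (hmem j').mpr h1, Or.inr ⟨h2, rfl⟩⟩
        · exact Or.inr ⟨j' - 1, (hmem _).mpr h1, Or.inl ⟨h2, Or.inr (by omega)⟩⟩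
        · exact Or.inr ⟨j' + 1, (hmem _).mpr h1, Or.inl ⟨h2, Or.inl (by omega)⟩⟩
    have hbd2 : ∀ j' ∈ (rowStep (cols, res) below).1, (j' - j0).natAbs ≤ t + 1 := by
      intro j' hj'
      rw [rowStep, hmemfold j'] at hj'
      rcases hj' with h | ⟨jj, hjj, ⟨_, (rfl | rfl)⟩ | ⟨_, rfl⟩⟩
      · cases h
      · have := hbd _ hjj; omega
      · have := hbd _ hjj; omega
      · have := hbd _ hjj; omega
    have hih := ih (t + 1) hdrop' (rowStep (cols, res) below).1 (rowStep (cols, res) below).2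
      hnd2 hmem2 hbd2
    rw [Prod.mk.eta] at hih
    rw [hih, hstep2, hcount]
    rw [Finset.sum_eq_sum_Ico_succ_bot (by omega : t < grid.length - 1)]
    ring

lemma part1_keys_modify_pair (k j' : Int) (d : PySem.Dict (Int × Int) Int) (s : PySem.Set Int)
    (h : d.keys = s.map (fun j => (k, j))) (d0 : Int) (f : Int → Int) :
    (d.modify (k, j') d0 f).keys = (PySem.Set.add s j').map (fun j => (k, j)) := by
  rw [PySem.Dict.keys_modify]
  by_cases hm : j' ∈ s
  · have hc : d.contains (k, j') = true := by
      rw [PySem.Dict.contains_iff_mem_keys, h]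
      exact List.mem_map_of_mem hm
    rw [PySem.Dict.keys_insert_of_contains _ _ hc, h, PySem.Set.add_of_mem hm]
  · have hc : d.contains (k, j') = false := by
      rw [← Bool.not_eq_true, PySem.Dict.contains_iff_mem_keys, h]
      intro hmem
      simp only [List.mem_map, Prod.mk.injEq] at hmem
      obtain ⟨j, hj, -, rfl⟩ := hmem
      exact hm hj
    rw [PySem.Dict.keys_insert_of_not_contains _ _ hc, h, PySem.Set.add_of_not_mem hm,
      List.map_append]
    simp

lemma part1_inner (grid : List String) (n k : Int) (below : String)
    (hbelow : (PySem.List.pyGet? grid (k + 1)).getD "" = below)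
    (hk : k ≠ n - 1) :
    ∀ (cols : PySem.Set Int) (items : List ((Int × Int) × Int)),
      items.map Prod.fst = cols.map (fun j => (k, j)) →
      ∀ (ndp : PySem.Dict (Int × Int) Int) (nxt : PySem.Set Int),
        ndp.keys = nxt.map (fun j => (k + 1, j)) →
        ∀ res : Int,
          (items.foldl (part1BodyA grid n) (ndp, res)).2
            = (cols.foldl (rowBody below) (nxt, res)).2
          ∧ (items.foldl (part1BodyA grid n) (ndp, res)).1.keys
            = (cols.foldl (rowBody below) (nxt, res)).1.map (fun j => (k + 1, j)) := by
  intro cols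
  induction cols with
  | nil =>
    intro items hitems ndp nxt hcorr res
    simp only [List.map_nil, List.map_eq_nil_iff] at hitems
    subst hitems
    exact ⟨rfl, hcorr⟩
  | cons j cols ih =>
    intro items hitems ndp nxt hcorr res
    cases items with
    | nil => simp at hitems
    | cons kv items' =>
      obtain ⟨⟨ki, ji⟩, c⟩ := kv
      simp only [List.map_cons, List.cons.injEq, Prod.mk.injEq] at hitems
      obtain ⟨⟨h1, h2⟩, hrest⟩ := hitems
      subst h1; subst h2
      have hkbeq : (ki == n - 1) = false := by simpa using hk
      cases hch : (PySem.Str.pyGet? below ji).getD ' ' == '^' with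
      | true =>
        have hch2 : (PySem.List.pyGet?
            ((PySem.List.pyGet? grid (ki + 1)).getD "").toList ji).getD ' ' = '^' := by
          rw [hbelow]; simpa using hch
        have hch3 : (PySem.List.pyGet? below.toList ji).getD ' ' = '^' := by simpa using hch
        have hA : part1BodyA grid n (ndp, res) ((ki, ji), c)
            = ((ndp.modify (ki + 1, ji - 1) 0 (· + 1)).modify (ki + 1, ji + 1) 0 (· + 1),
               res + 1) := by
          simp [part1BodyA, hkbeq, hch2]
        have hB : rowBody below (nxt, res) ji
            = (PySem.Set.add (PySem.Set.add nxt (ji - 1)) (ji + 1), res + 1) := by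
          simp [rowBody, hch3]
        rw [List.foldl_cons, List.foldl_cons, hA, hB]
        exact ih items' hrest _ _
          (part1_keys_modify_pair (ki + 1) (ji + 1) _ _
            (part1_keys_modify_pair (ki + 1) (ji - 1) ndp nxt hcorr 0 _) 0 _) (res + 1)
      | false =>
        have hch2 : ¬ (PySem.List.pyGet?
            ((PySem.List.pyGet? grid (ki + 1)).getD "").toList ji).getD ' ' = '^' := by
          rw [hbelow]; simpa using hch
        have hch3 : ¬ (PySem.List.pyGet? below.toList ji).getD ' ' = '^' := by simpa using hch
        have hA : part1BodyA grid n (ndp, res) ((ki, ji), c)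
            = (ndp.modify (ki + 1, ji) 0 (· + 1), res) := by
          simp [part1BodyA, hkbeq, hch2]
        have hB : rowBody below (nxt, res) ji = (PySem.Set.add nxt ji, res) := by
          simp [rowBody, hch3]
        rw [List.foldl_cons, List.foldl_cons, hA, hB]
        exact ih items' hrest _ _
          (part1_keys_modify_pair (ki + 1) ji ndp nxt hcorr 0 _) res

lemma part1_outer (grid : List String) (n : Int) (hn : n = PySem.List.len grid) :
    ∀ (rows : List String) (l : List Int), l.length = rows.length →
      ∀ (k : Nat), grid.drop (k + 1) = rows →
        ∀ (dp : PySem.Dict (Int × Int) Int) (cols : PySem.Set Int),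
          dp.keys = cols.map (fun j => ((k : Int), j)) →
          ∀ res : Int,
            (l.foldl (part1StepA grid n) (dp, res)).2
              = (rows.foldl rowStep (cols, res)).2 := by
  intro rows
  induction rows with
  | nil =>
    intro l hl k hrows dp cols hkeys res
    simp only [List.length_nil, List.length_eq_zero_iff] at hl
    subst hl
    rfl
  | cons below rows' ih =>
    intro l hl k hrows dp cols hkeys res
    cases l with
    | nil => simp at hl
    | cons a l' =>
      simp only [List.length_cons] at hl
      have hl' : l'.length = rows'.length := by omega
      have hlt : k + 1 < grid.length := by
        by_contra hge
        have hnil : grid.drop (k + 1) = [] := List.drop_eq_nil_of_le (by omega)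
        rw [hrows] at hnil
        simp at hnil
      have hbelow : (PySem.List.pyGet? grid ((k : Int) + 1)).getD "" = below := by
        have h1 : ((k : Int) + 1) = ((k + 1 : Nat) : Int) := by push_cast; ring
        rw [h1, PySem.List.pyGet?_natCast, ← List.head?_drop, hrows]
        rfl
      have hkne : (k : Int) ≠ n - 1 := by
        subst hn
        simp only [PySem.List.len_eq]
        omega
      have hrows' : grid.drop (k + 1 + 1) = rows' := by
        have h2 : grid.drop (k + 1 + 1) = (grid.drop (k + 1)).drop 1 := by
          rw [List.drop_drop]
        rw [h2, hrows, List.drop_one, List.tail_cons]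
      obtain ⟨hres, hcorr⟩ :=
        part1_inner grid n (k : Int) below hbelow hkne cols dp.items hkeys
          PySem.Dict.empty PySem.Set.empty (by simp [PySem.Dict.keys_empty]) res
      have hcast : (((k + 1 : Nat)) : Int) = (k : Int) + 1 := by push_cast; ring
      have hcorr' :
          (dp.items.foldl (part1BodyA grid n) (PySem.Dict.empty, res)).1.keys
            = (cols.foldl (rowBody below) (PySem.Set.empty, res)).1.map
                (fun j => (((k + 1 : Nat) : Int), j)) := by
        simp only [hcast]
        exact hcorr
      have hrec := ih l' hl' (k + 1) hrows'
        (dp.items.foldl (part1BodyA grid n) (PySem.Dict.empty, res)).1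
        (cols.foldl (rowBody below) (PySem.Set.empty, res)).1 hcorr'
        (dp.items.foldl (part1BodyA grid n) (PySem.Dict.empty, res)).2
      have hfix :
          (rows'.foldl rowStep
              ((cols.foldl (rowBody below) (PySem.Set.empty, res)).1,
               (dp.items.foldl (part1BodyA grid n) (PySem.Dict.empty, res)).2)).2
            = (rows'.foldl rowStep
                (cols.foldl (rowBody below) (PySem.Set.empty, res))).2 := by
        rw [hres]
      exact hrec.trans hfix

lemma A_eq_rowfold (data : List String) :
    part1 data
      = (((data.map PySem.Str.rstrip).tail).foldl rowStep
          ([PySem.Str.find ((PySem.List.pyGet? (data.map PySem.Str.rstrip) 0).getD "") "S"],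
            0)).2 := by
  simp only [part1, PySem.List.foldl_append_singleton_eq_map, List.nil_append]
  refine part1_outer (data.map PySem.Str.rstrip) _ rfl
    ((data.map PySem.Str.rstrip).tail)
    (PySem.List.pyRange 0 (PySem.List.len (data.map PySem.Str.rstrip) - 1) 1) ?_ 0 ?_ _ _ ?_ 0
  · rw [PySem.List.length_pyRange_one]
    simp only [PySem.List.len_eq, List.length_tail]
    omega
  · simp
  · rw [PySem.Dict.keys_modify,
      PySem.Dict.keys_insert_of_not_contains _ _ (by simp [PySem.Dict.contains_empty]),
      PySem.Dict.keys_empty]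
    simp

lemma part1_eq (data : List String) (hne : data ≠ []) : part1 data = part1_alt data := by
  have hg1 : 1 ≤ (data.map PySem.Str.rstrip).length := by
    rw [List.length_map]
    exact List.length_pos_of_ne_nil hne
  rw [A_eq_rowfold data]
  rw [show part1_alt data
      = part1LoopB (data.map PySem.Str.rstrip) ((data.map PySem.Str.rstrip).length : Int)
          (2 + 2 * (data.map PySem.Str.rstrip).length *
            (2 * (data.map PySem.Str.rstrip).length + 1))
          [(0, PySem.Str.find
              ((PySem.List.pyGet? (data.map PySem.Str.rstrip) 0).getD "") "S")]
          [] 0 from by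
    simp only [part1_alt, PySem.List.len_eq, Int.toNat_natCast]
    rfl]
  rw [dfs_loop (data.map PySem.Str.rstrip)
      (PySem.Str.find ((PySem.List.pyGet? (data.map PySem.Str.rstrip) 0).getD "") "S")
      (data.map PySem.Str.rstrip).length hg1 _ _ _ 0
      (by
        intro c hc
        rcases List.mem_cons.mp hc with hc | hc
        · subst hc
          exact ⟨0, rfl, by omega, by simp⟩
        · cases hc)
      List.nodup_nil
      (by intro c hc; cases hc)
      (by
        simp only [List.length_cons, List.length_nil, List.length_map]
        have h2 : 2 * (data.length * (2 * data.length + 1))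
            = 2 * data.length * (2 * data.length + 1) := by ring
        omega)]
  rw [phig_init]
  rw [row_phase (data.map PySem.Str.rstrip)
      (PySem.Str.find ((PySem.List.pyGet? (data.map PySem.Str.rstrip) 0).getD "") "S")
      ((data.map PySem.Str.rstrip).tail) 0 List.drop_one _ 0
      (List.nodup_singleton _)
      (by
        intro j
        simp [reachedb])
      (by
        intro j hj
        rcases List.mem_singleton.mp hj with rfl
        simp)]
  rw [Finset.range_eq_Ico]

-- ===== VERDICT (by name: the statement is the Claim_ definition above) =====
theorem part1_spec : Claim_equal_part1 := by
  intro data _ hpre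
  unfold Spec_part1
  exact part1_eq data hpre.1
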